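-- pv_equiv track=rewrite | github.com/ATPs/xiaolongTools | WenlinTools.Python3/scripts/nexus2newick_bad.py | remove_annotation
-- ===== SOURCE A (Python) =====
-- def remove_annotation(tree):
--     new = []
--     taken = True
--     for char in tree:
--         if char == '[':
--             taken = False
--         elif char == ']':
--             taken = True
--             continue
--
--         if taken:
--             new.append(char)
--     return ''.join(new)
-- ===== SOURCE B (Python) =====
-- def remove_annotation(tree):
--     parts = tree.split('[')
--     pieces = [parts[0].replace(']', '')]
--     for p in parts[1:]:
--         i = p.find(']')
--         if i != -1:
--             pieces.append(p[i + 1:].replace(']', ''))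
--     return ''.join(pieces)
-- ===== Notes on version B (the rewrite author's own statement) =====
-- stated objective: faster
-- what changed: Replaces the char-by-char scan with a taken flag by a split-on-'[' pipeline: strip ']' from the part before the first '[', and for each later part keep only what follows its first ']' (stripped of stray ']'), then join.
import Mathlib
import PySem

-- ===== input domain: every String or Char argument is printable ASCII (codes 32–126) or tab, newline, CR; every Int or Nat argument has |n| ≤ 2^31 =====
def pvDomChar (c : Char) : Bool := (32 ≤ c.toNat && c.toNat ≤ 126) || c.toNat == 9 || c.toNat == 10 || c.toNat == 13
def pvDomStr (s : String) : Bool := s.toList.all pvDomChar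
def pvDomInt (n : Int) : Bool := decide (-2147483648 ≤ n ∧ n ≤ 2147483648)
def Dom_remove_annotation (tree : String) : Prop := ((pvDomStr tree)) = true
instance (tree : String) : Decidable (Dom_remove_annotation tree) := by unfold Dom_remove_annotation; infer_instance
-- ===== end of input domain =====

-- B replaces A's char-by-char scan with a taken-flag by a split-on-'[' pipeline
-- (take the text after the first ']' of each bracketed segment, strip stray ']'),
-- a different decomposition of the same task (a timing run measured B faster).

-- ===== PORT A =====
-- literal port of A's loop: state (new, taken), append char iff taken
def remove_annotation (tree : String) : String :=
  let st := tree.toList.foldl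
    (fun (p : List Char × Bool) char =>
      if char = '[' then (p.1, false)               -- taken = False; then `if taken` fails
      else if char = ']' then (p.1, true)           -- taken = True; continue (no append)
      else if p.2 then (p.1 ++ [char], p.2) else p) -- append iff taken
    ([], true)
  String.ofList st.1

-- ===== PORT B =====
-- literal port of Source B: split on '[', strip ']' from the head part, and for every
-- later part keep what follows its first ']' (stripped of further ']'), then join
def remove_annotation_alt (tree : String) : String :=
  let parts := PySem.Chars.splitOn tree.toList ['[']
  let pieces := [PySem.Chars.replace (parts.headD []) [']'] []]
  let pieces := parts.tail.foldl
    (fun acc p =>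
      let i := PySem.Chars.find p [']']
      if i ≠ -1 then acc ++ [PySem.Chars.replace (PySem.Chars.slice p (some (i + 1)) none) [']'] []]
      else acc)
    pieces
  String.ofList (PySem.Chars.join [] pieces)

-- ===== PRECONDITION & SPEC =====
def Spec_remove_annotation (tree : String) (out : String) : Prop := out = remove_annotation_alt tree
instance (tree : String) (out : String) : Decidable (Spec_remove_annotation tree out) := by unfold Spec_remove_annotation; infer_instance

-- ===== CLAIM (what is proved, stated in full; the proofs are below) =====
def Claim_equal_remove_annotation : Prop := ∀ (tree : String), Dom_remove_annotation tree → Spec_remove_annotation tree (remove_annotation tree)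

-- ===== LEMMAS AND PROOFS =====

-- A's loop, as a structural recursion indexed by the taken flag
def pvScan : Bool → List Char → List Char
  | _, [] => []
  | t, c :: cs =>
    if c = '[' then pvScan false cs
    else if c = ']' then pvScan true cs
    else if t then c :: pvScan t cs else pvScan t cs

-- split on '[' as (first part, later parts), structurally
def pvSplit : List Char → List Char × List (List Char)
  | [] => ([], [])
  | c :: cs =>
    let r := pvSplit cs
    if c = '[' then ([], r.1 :: r.2) else (c :: r.1, r.2)

def pvFilt (p : List Char) : List Char := p.filter (· ≠ ']')

-- B's contribution of one post-'[' segment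
def pvSeg (p : List Char) : List Char :=
  if ']' ∈ p then pvFilt (p.drop (p.idxOf ']' + 1)) else []

-- ---- A side: the fold computes pvScan ----
lemma pvFoldA (cs : List Char) : ∀ (acc : List Char) (t : Bool),
    (cs.foldl (fun (p : List Char × Bool) char =>
      if char = '[' then (p.1, false)
      else if char = ']' then (p.1, true)
      else if p.2 then (p.1 ++ [char], p.2) else p) (acc, t)).1 = acc ++ pvScan t cs := by
  induction cs with
  | nil => intro acc t; simp [pvScan]
  | cons c cs ih =>
    intro acc t
    by_cases h1 : c = '['
    · simp [h1, pvScan, ih]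
    · by_cases h2 : c = ']'
      · simp [h2, pvScan, ih]
      · cases t with
        | false => simp [h1, h2, pvScan, ih]
        | true => simp [h1, h2, pvScan, ih]

-- ---- splitOn '[' computes pvSplit ----
lemma pvSplitGo : ∀ (fuel : Nat) (l cur : List Char) (accs : List (List Char)),
    l.length ≤ fuel →
    PySem.Chars.splitOn.go ['['] fuel l cur (accs.map id) =
      (accs.map id).reverse ++ (cur.reverse ++ (pvSplit l).1) :: (pvSplit l).2 := by
  intro fuel
  induction fuel with
  | zero =>
    intro l cur accs h
    have : l = [] := List.eq_nil_of_length_eq_zero (Nat.le_zero.mp h)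
    subst this
    simp [PySem.Chars.splitOn.go, pvSplit]
  | succ n ih =>
    intro l cur accs h
    cases l with
    | nil => simp [PySem.Chars.splitOn.go, pvSplit]
    | cons c rest =>
      have hle : rest.length ≤ n := by simpa using Nat.le_of_succ_le_succ h
      by_cases hc : c = '['
      · have := ih rest [] (cur.reverse :: accs) hle
        simp only [List.map_id] at this ⊢
        simp [PySem.Chars.splitOn.go, List.isPrefixOf, pvSplit, hc, this]
      · have hne : ¬ ('[' = c) := fun e => hc e.symm
        have := ih rest (c :: cur) accs hle
        simp only [List.map_id] at this ⊢
        simp [PySem.Chars.splitOn.go, List.isPrefixOf, pvSplit, hc, hne, this]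

lemma pvSplitOn_eq (l : List Char) :
    PySem.Chars.splitOn l ['['] = (pvSplit l).1 :: (pvSplit l).2 := by
  have := pvSplitGo (l.length + 1) l [] [] (by omega)
  simpa [PySem.Chars.splitOn] using this

-- ---- replace ']' '' computes pvFilt ----
lemma pvReplaceGo : ∀ (fuel : Nat) (l acc : List Char), l.length ≤ fuel →
    PySem.Chars.replace.go [']'] [] fuel l acc = acc.reverse ++ pvFilt l := by
  intro fuel
  induction fuel with
  | zero =>
    intro l acc h
    have : l = [] := List.eq_nil_of_length_eq_zero (Nat.le_zero.mp h)
    subst this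
    simp [PySem.Chars.replace.go, pvFilt]
  | succ n ih =>
    intro l acc h
    cases l with
    | nil => simp [PySem.Chars.replace.go, pvFilt]
    | cons c rest =>
      have hle : rest.length ≤ n := by simpa using Nat.le_of_succ_le_succ h
      by_cases hc : c = ']'
      · simp [PySem.Chars.replace.go, List.isPrefixOf, pvFilt, hc, ih rest acc hle]
      · have hne : ¬ (']' = c) := fun e => hc e.symm
        simp [PySem.Chars.replace.go, List.isPrefixOf, pvFilt, hc, hne,
          ih rest (c :: acc) hle]

lemma pvReplace_eq (l : List Char) : PySem.Chars.replace l [']'] [] = pvFilt l := by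
  have := pvReplaceGo l.length l [] le_rfl
  simpa [PySem.Chars.replace] using this

-- ---- find ']' computes idxOf ----
lemma pvFindGo : ∀ (l : List Char) (k : Nat),
    PySem.Chars.find.go [']'] l k =
      (if ']' ∈ l then ((k + l.idxOf ']' : Nat) : Int) else -1) := by
  intro l
  induction l with
  | nil => intro k; simp [PySem.Chars.find.go]
  | cons c rest ih =>
    intro k
    by_cases hc : c = ']'
    · simp [PySem.Chars.find.go, List.isPrefixOf, hc]
    · have hne : ¬ (']' = c) := fun h => hc h.symm
      have hbeq : (c == ']') = false := by simp [hc]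
      by_cases hm : ']' ∈ rest
      · simp only [PySem.Chars.find.go, List.isPrefixOf]
        simp [ih, hm, hne, List.idxOf_cons, hbeq]
        ring
      · simp only [PySem.Chars.find.go, List.isPrefixOf]
        simp [ih, hm, hne]

lemma pvFind_eq (l : List Char) :
    PySem.Chars.find l [']'] = (if ']' ∈ l then ((l.idxOf ']' : Nat) : Int) else -1) := by
  simpa using pvFindGo l 0

-- B's per-segment branch equals pvSeg
lemma pvPiece_eq (p : List Char) :
    (if PySem.Chars.find p [']'] ≠ -1
      then [PySem.Chars.replace (PySem.Chars.slice p (some (PySem.Chars.find p [']'] + 1)) none) [']'] []]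
      else []) = (if ']' ∈ p then [pvSeg p] else []) := by
  by_cases hm : ']' ∈ p
  · rw [pvFind_eq]
    simp only [hm, if_true]
    rw [if_pos (show ((p.idxOf ']' : Nat) : Int) ≠ -1 by omega)]
    have hcast : ((p.idxOf ']' : Nat) : Int) + 1 = ((p.idxOf ']' + 1 : Nat) : Int) := by push_cast; ring
    rw [hcast]
    simp only [PySem.Chars.slice]
    rw [PySem.List.slice_from_natCast, pvReplace_eq]
    simp [pvSeg, hm]
  · rw [pvFind_eq]
    simp [hm]

-- ---- the heart: A's scan equals B's split pipeline ----
lemma pvSeg_cons_of_ne (c : Char) (h : List Char) (hc : c ≠ ']') :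
    pvSeg (c :: h) = pvSeg h := by
  by_cases hm : ']' ∈ h
  · have hmem : ']' ∈ c :: h := List.mem_cons_of_mem _ hm
    have hbeq : (c == ']') = false := by simp [hc]
    simp [pvSeg, hm, hmem, List.idxOf_cons, hbeq]
  · have : ']' ∉ c :: h := by
      intro hx; rcases List.mem_cons.mp hx with e | e
      · exact hc e.symm
      · exact hm e
    simp [pvSeg, hm, this]

lemma pvMain : ∀ (cs : List Char),
    pvScan true cs = pvFilt (pvSplit cs).1 ++ (pvSplit cs).2.flatMap pvSeg ∧
    pvScan false cs = pvSeg (pvSplit cs).1 ++ (pvSplit cs).2.flatMap pvSeg := by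
  intro cs
  induction cs with
  | nil => simp [pvScan, pvSplit, pvFilt, pvSeg]
  | cons c rest ih =>
    obtain ⟨ihT, ihF⟩ := ih
    by_cases h1 : c = '['
    · constructor
      · simp [pvScan, pvSplit, h1, pvFilt, pvSeg, ihF]
      · simp [pvScan, pvSplit, h1, pvSeg, ihF]
    · by_cases h2 : c = ']'
      · constructor
        · -- head of pvSplit rest gets ']' prepended; filt drops it
          simp [pvScan, pvSplit, h2, pvFilt, ihT]
        · -- skip mode sees ']': resume take mode on rest
          have : pvSeg (']' :: (pvSplit rest).1) = pvFilt (pvSplit rest).1 := by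
            simp [pvSeg, pvFilt]
          simp [pvScan, pvSplit, h2, this, ihT]
      · constructor
        · simp [pvScan, pvSplit, h1, h2, pvFilt, ihT]
        · simp [pvScan, pvSplit, h1, h2, pvSeg_cons_of_ne c _ h2, ihF]

-- join with empty separator is flatten
lemma pvJoinNil (l : List (List Char)) : PySem.Chars.join [] l = l.flatten := by
  unfold PySem.Chars.join
  induction l with
  | nil => simp [List.intercalate]
  | cons a t ih =>
    cases t with
    | nil => simp [List.intercalate]
    | cons b t2 =>
      simp only [List.intercalate, List.intersperse] at ih ⊢
      simp at ih ⊢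
      simpa using ih

-- ---- B's pieces fold, joined ----
lemma pvJoinFold (ps : List (List Char)) : ∀ (init : List (List Char)),
    PySem.Chars.join []
      (ps.foldl (fun acc p =>
        let i := PySem.Chars.find p [']']
        if i ≠ -1 then acc ++ [PySem.Chars.replace (PySem.Chars.slice p (some (i + 1)) none) [']'] []]
        else acc) init)
      = PySem.Chars.join [] init ++ ps.flatMap pvSeg := by
  induction ps with
  | nil => intro init; simp
  | cons p ps ih =>
    intro init
    simp only [List.foldl_cons]
    by_cases hm : ']' ∈ p
    · have hne : PySem.Chars.find p [']'] ≠ -1 := by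
        rw [pvFind_eq]; simp [hm]
      have harg : PySem.Chars.replace (PySem.Chars.slice p (some (PySem.Chars.find p [']'] + 1)) none) [']'] [] = pvSeg p := by
        have h2 := pvPiece_eq p
        rw [if_pos hne] at h2
        simpa [hm] using h2
      rw [if_pos hne, harg, ih]
      simp [pvJoinNil, pvSeg, hm]
    · rw [if_neg (by simp [pvFind_eq, hm])]
      rw [ih]
      simp [pvSeg, hm]

-- ===== VERDICT (by name: the statement is the Claim_ definition above) =====
theorem remove_annotation_spec : Claim_equal_remove_annotation := by
  intro tree _
  unfold Spec_remove_annotation remove_annotation remove_annotation_alt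
  simp only []
  rw [pvFoldA tree.toList [] true]
  rw [pvSplitOn_eq]
  simp only [List.headD_cons, List.tail_cons]
  rw [pvJoinFold]
  rw [pvReplace_eq]
  have hmain := (pvMain tree.toList).1
  simp only [List.nil_append] at *
  rw [hmain]
  simp [PySem.Chars.join, List.intercalate]
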